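-- pv_equiv track=rewrite | github.com/HelloSSIFI/HelloWorld | programmers/Lv2_유사_칸토어_비트열/s1_kcw0360.py | solution
-- ===== SOURCE A (Python) =====
-- def solution(n, l, r):
--     answer = 0
--     for idx in range(l, r+1):
--
--         if idx % 5 == 3:
--             continue
--
--         temp = idx
--         flag = True
--         while True:
--             if temp % 5 == 0:
--                 temp //= 5
--             else:
--                 temp = (temp // 5) + 1
--
--             if temp % 5 == 3:
--                 flag = False
--                 break
--             elif temp <= 5:
--                 break
--
--         if flag:
--             answer += 1
--
--     return answer
-- ===== SOURCE B (Python) =====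
-- # Prefix digit-DP: position k (1-based) of the Cantor-like base-5 bitstring is '1'
-- # iff k-1 has no base-5 digit 2; count [l,r] as prefix(r) - prefix(l-1) in O(log r).
--
-- def _noTwo(m):
--     # True iff m (>= 0) has no digit 2 in base 5
--     while m > 0:
--         if m % 5 == 2:
--             return False
--         m //= 5
--     return True
--
-- def _cnt(y):
--     # number of m in [0..y] with no base-5 digit 2
--     if y < 0:
--         return 0
--     q, d = y // 5, y % 5
--     low = d + 1 if d < 2 else d
--     return 4 * _cnt(q - 1) + (low if _noTwo(q) else 0)
--
-- def _prefix(x):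
--     # number of '1' positions among indices 0..x (index 0 counts as a 1)
--     return 0 if x < 0 else 1 + _cnt(x - 1)
--
-- def solution(n, l, r):
--     if r < l:
--         return 0
--     return _prefix(r) - _prefix(l - 1)
-- ===== Notes on version B (the rewrite author's own statement) =====
-- stated objective: faster
-- what changed: Instead of testing every index in [l,r] with a per-index division chain, B counts good positions by a recursive base-5 digit DP prefix count and returns prefix(r) - prefix(l-1).
-- outside the precondition, e.g. on solution(0, -3, 2): A returns 5, B returns 3
import Mathlib
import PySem

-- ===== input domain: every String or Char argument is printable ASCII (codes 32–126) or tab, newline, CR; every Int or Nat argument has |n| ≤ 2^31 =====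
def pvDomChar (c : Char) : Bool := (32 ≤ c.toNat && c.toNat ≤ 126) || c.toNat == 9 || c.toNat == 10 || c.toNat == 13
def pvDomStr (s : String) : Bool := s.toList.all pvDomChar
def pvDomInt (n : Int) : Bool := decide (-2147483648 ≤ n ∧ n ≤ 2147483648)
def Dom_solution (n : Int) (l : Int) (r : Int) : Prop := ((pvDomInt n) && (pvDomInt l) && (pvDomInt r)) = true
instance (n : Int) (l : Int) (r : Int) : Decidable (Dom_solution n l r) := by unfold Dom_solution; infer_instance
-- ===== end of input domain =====

-- B replaces A's per-index division-chain scan of [l,r] by a recursive base-5 digit-DP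
-- prefix count, returning prefix(r) - prefix(l-1).

-- ===== PORT A =====
-- the inner `while True` loop of A; returns the final value of `flag`
def pvLoopA (temp : Int) : Bool :=
  let t : Int := if PySem.Int.mod temp 5 = 0 then PySem.Int.floordiv temp 5
                 else PySem.Int.floordiv temp 5 + 1
  if PySem.Int.mod t 5 = 3 then false
  else if t ≤ 5 then true
  else pvLoopA t
termination_by temp.toNat
decreasing_by
  have htv : t = if PySem.Int.mod temp 5 = 0 then PySem.Int.floordiv temp 5
                 else PySem.Int.floordiv temp 5 + 1 := rfl
  clear_value t
  simp only [PySem.Int.mod_eq_emod_of_pos (show (0:Int) < 5 by norm_num),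
    PySem.Int.floordiv_eq_ediv_of_pos (show (0:Int) < 5 by norm_num)] at *
  split_ifs at * <;> omega

def solution (n : Int) (l : Int) (r : Int) : Int :=
  (PySem.List.pyRange l (r + 1) 1).foldl
    (fun answer idx =>
      if PySem.Int.mod idx 5 = 3 then answer
      else if pvLoopA idx then answer + 1 else answer) 0

-- ===== PORT B =====
-- True iff m (≥ 0) has no base-5 digit 2
def pvNoTwo (m : Int) : Bool :=
  if 0 < m then
    if PySem.Int.mod m 5 = 2 then false else pvNoTwo (PySem.Int.floordiv m 5)
  else true
termination_by m.toNat
decreasing_by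
  simp only [PySem.Int.floordiv_eq_ediv_of_pos (by norm_num : (0:Int) < 5)] at *
  omega

-- number of m in [0..y] with no base-5 digit 2
def pvCnt (y : Int) : Int :=
  if y < 0 then 0
  else
    let q : Int := PySem.Int.floordiv y 5
    let d : Int := PySem.Int.mod y 5
    let low : Int := if d < 2 then d + 1 else d
    4 * pvCnt (q - 1) + (if pvNoTwo q then low else 0)
termination_by (y + 1).toNat
decreasing_by
  simp only [PySem.Int.floordiv_eq_ediv_of_pos (by norm_num : (0:Int) < 5)] at *
  omega

def pvPrefix (x : Int) : Int := if x < 0 then 0 else 1 + pvCnt (x - 1)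

def solution_alt (n : Int) (l : Int) (r : Int) : Int :=
  if r < l then 0 else pvPrefix r - pvPrefix (l - 1)

-- ===== PRECONDITION & SPEC =====
-- Pre_ restricts nonempty ranges to nonnegative l: negative indices are outside the
-- problem's natural domain (1-based positions of a bitstring), and B's prefix-count
-- formula is not meant for them; empty ranges (r < l) are kept for any l.
def Pre_solution (n : Int) (l : Int) (r : Int) : Prop := 0 ≤ l ∨ r < l
instance (n : Int) (l : Int) (r : Int) : Decidable (Pre_solution n l r) := by
  unfold Pre_solution; infer_instance

def pvWitness_solution : Int × Int × Int := (5, 1, 20)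

def Spec_solution (n : Int) (l : Int) (r : Int) (out : Int) : Prop := out = solution_alt n l r
instance (n : Int) (l : Int) (r : Int) (out : Int) : Decidable (Spec_solution n l r out) := by
  unfold Spec_solution; infer_instance

-- ===== CLAIM (what is proved, stated in full; the proofs are below) =====
def Claim_equal_solution : Prop := ∀ (n : Int) (l : Int) (r : Int), Dom_solution n l r → Pre_solution n l r → Spec_solution n l r (solution n l r)

-- ===== LEMMAS AND PROOFS =====

-- proof-side mirror of pvNoTwo on Nat
def noTwoN : Nat → Bool
  | 0 => true
  | n + 1 => if (n + 1) % 5 = 2 then false else noTwoN ((n + 1) / 5)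
decreasing_by omega

-- proof-side prefix counter: number of m in [0..n-1] with noTwoN
def CN : Nat → Nat
  | 0 => 0
  | n + 1 => CN n + (if noTwoN n then 1 else 0)

theorem noTwoN_pos (nn : Nat) (h : 0 < nn) :
    noTwoN nn = if nn % 5 = 2 then false else noTwoN (nn / 5) := by
  obtain ⟨m, rfl⟩ : ∃ m, nn = m + 1 := ⟨nn - 1, by omega⟩
  rw [noTwoN]

theorem noTwoN_small (q : Nat) (h : q ≤ 4) : noTwoN q = decide (q ≠ 2) := by
  interval_cases q <;> simp [noTwoN_pos, noTwoN]

theorem noTwoN_step (k b : Nat) (hb : b < 5) :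
    noTwoN (5 * k + b) = (decide (b ≠ 2) && noTwoN k) := by
  rcases Nat.eq_zero_or_pos (5 * k + b) with h | h
  · have hk : k = 0 := by omega
    have hb0 : b = 0 := by omega
    subst hk; subst hb0
    simp [noTwoN]
  · rw [noTwoN_pos _ h]
    have h1 : (5 * k + b) % 5 = b := by omega
    have h2 : (5 * k + b) / 5 = k := by omega
    rw [h1, h2]
    by_cases hb2 : b = 2 <;> simp [hb2]

theorem CN_split_step (q e : Nat) (he : e ≤ 5) (h0 : CN (5 * q) = 4 * CN q) :
    CN (5 * q + e) = 4 * CN q + (if noTwoN q then e - (if 3 ≤ e then 1 else 0) else 0) := by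
  induction e with
  | zero => simpa using h0
  | succ e ihe =>
    have hstep : CN (5 * q + (e + 1)) = CN (5 * q + e) + (if noTwoN (5 * q + e) then 1 else 0) := rfl
    rw [hstep, ihe (by omega), noTwoN_step q e (by omega)]
    by_cases hq : noTwoN q
    · by_cases he2 : e = 2
      · subst he2; simp [hq]
      · simp [hq, he2]
        split_ifs <;> omega
    · simp [hq]

theorem CN_mul (q : Nat) : CN (5 * q) = 4 * CN q := by
  induction q with
  | zero => rfl
  | succ q ih =>
    have h5 : 5 * (q + 1) = 5 * q + 5 := by ring
    have hc : CN (q + 1) = CN q + (if noTwoN q then 1 else 0) := rfl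
    rw [h5, CN_split_step q 5 (by omega) ih, hc]
    by_cases hq : noTwoN q <;> simp [hq] <;> ring

theorem CN_split (q e : Nat) (he : e ≤ 5) :
    CN (5 * q + e) = 4 * CN q + (if noTwoN q then e - (if 3 ≤ e then 1 else 0) else 0) :=
  CN_split_step q e he (CN_mul q)

theorem pvmod5 (a : Int) : PySem.Int.mod a 5 = a % 5 :=
  PySem.Int.mod_eq_emod_of_pos (by norm_num)

theorem pvdiv5 (a : Int) : PySem.Int.floordiv a 5 = a / 5 :=
  PySem.Int.floordiv_eq_ediv_of_pos (by norm_num)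

theorem pvNoTwo_eq (m : Int) (hm : 0 ≤ m) : pvNoTwo m = noTwoN m.toNat := by
  induction hn : m.toNat using Nat.strong_induction_on generalizing m with
  | _ n ih =>
    subst hn
    rw [pvNoTwo]
    by_cases hpos : 0 < m
    · rw [if_pos hpos, pvmod5, pvdiv5, noTwoN_pos _ (by omega)]
      by_cases h2 : m % 5 = 2
      · rw [if_pos h2, if_pos (show m.toNat % 5 = 2 by omega)]
      · rw [if_neg h2, if_neg (show ¬ m.toNat % 5 = 2 by omega),
          ih (m / 5).toNat (by omega) (m / 5) (by omega) rfl]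
        congr 1
        omega
    · have h0 : m = 0 := by omega
      subst h0
      norm_num [noTwoN]

theorem pvCnt_eq (y : Int) (hy : 0 ≤ y) : pvCnt y = ((CN (y.toNat + 1) : Nat) : Int) := by
  induction hn : y.toNat using Nat.strong_induction_on generalizing y with
  | _ n ih =>
    subst hn
    rw [pvCnt, if_neg (by omega)]
    simp only [pvmod5, pvdiv5]
    have hq0 : 0 ≤ y / 5 := by omega
    have hrec : pvCnt (y / 5 - 1) = ((CN ((y / 5).toNat) : Nat) : Int) := by
      by_cases hq : 5 ≤ y
      · rw [ih (y / 5 - 1).toNat (by omega) (y / 5 - 1) (by omega) rfl]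
        congr 2
        omega
      · have h0 : y / 5 = 0 := by omega
        rw [h0, show (0:Int) - 1 = -1 from by norm_num, pvCnt, if_pos (by norm_num)]
        norm_num [CN]
    rw [pvNoTwo_eq _ hq0, hrec]
    have hsplit : y.toNat + 1 = 5 * (y / 5).toNat + (y.toNat % 5 + 1) := by omega
    rw [hsplit, CN_split _ _ (by omega)]
    split_ifs <;> push_cast <;> omega

-- A's per-index test, as a single boolean
def pvGood (k : Int) : Bool := if PySem.Int.mod k 5 = 3 then false else pvLoopA k

theorem good_char (k : Int) (hk : 1 ≤ k) : pvGood k = noTwoN (k - 1).toNat := by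
  induction hn : k.toNat using Nat.strong_induction_on generalizing k with
  | _ n ih =>
    subst hn
    have ht : (if PySem.Int.mod k 5 = 0 then PySem.Int.floordiv k 5
               else PySem.Int.floordiv k 5 + 1) = (((k - 1).toNat / 5 : Nat) : Int) + 1 := by
      rw [pvmod5, pvdiv5]
      split_ifs <;> omega
    rw [pvGood, pvLoopA]
    simp only [ht]
    have hmod1 : (PySem.Int.mod k 5 = 3) ↔ ((k - 1).toNat % 5 = 2) := by
      rw [pvmod5]
      omega
    have hmod2 : (PySem.Int.mod ((((k - 1).toNat / 5 : Nat) : Int) + 1) 5 = 3)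
        ↔ ((k - 1).toNat / 5 % 5 = 2) := by
      rw [pvmod5]
      omega
    by_cases hq4 : (k - 1).toNat / 5 ≤ 4
    · have hle : (((k - 1).toNat / 5 : Nat) : Int) + 1 ≤ 5 := by omega
      have hstep' : noTwoN (k - 1).toNat
          = (decide ((k - 1).toNat % 5 ≠ 2) && noTwoN ((k - 1).toNat / 5)) := by
        conv_lhs => rw [show (k - 1).toNat = 5 * ((k - 1).toNat / 5) + (k - 1).toNat % 5 by omega]
        rw [noTwoN_step _ _ (by omega)]
      rw [hstep', noTwoN_small _ (by omega)]
      by_cases h1 : (k - 1).toNat % 5 = 2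
      · rw [if_pos (hmod1.mpr h1), decide_eq_false (show ¬ ((k - 1).toNat % 5 ≠ 2) by omega),
          Bool.false_and]
      · rw [if_neg (fun hc => h1 (hmod1.mp hc)),
          decide_eq_true (show (k - 1).toNat % 5 ≠ 2 by omega), Bool.true_and]
        by_cases h2 : (k - 1).toNat / 5 = 2
        · rw [if_pos (hmod2.mpr (by omega)),
            decide_eq_false (show ¬ ((k - 1).toNat / 5 ≠ 2) by omega)]
        · rw [if_neg (fun hc => h2 (by have := hmod2.mp hc; omega)), if_pos hle,
            decide_eq_true (show (k - 1).toNat / 5 ≠ 2 by omega)]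
    · have hbig : 25 ≤ (k - 1).toNat := by omega
      have hlt : ¬ ((((k - 1).toNat / 5 : Nat) : Int) + 1 ≤ 5) := by omega
      have ihv := ih ((k - 1).toNat / 5 + 1) (by omega)
        ((((k - 1).toNat / 5 : Nat) : Int) + 1) (by omega) (by omega)
      rw [pvGood] at ihv
      have harg : ((((k - 1).toNat / 5 : Nat) : Int) + 1 - 1).toNat = (k - 1).toNat / 5 := by
        omega
      rw [harg] at ihv
      rw [if_neg hlt]
      have hrhs : noTwoN (k - 1).toNat
          = if (k - 1).toNat % 5 = 2 then false else noTwoN ((k - 1).toNat / 5) := by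
        rw [noTwoN_pos _ (by omega)]
      rw [hrhs, ← ihv]
      by_cases h1 : (k - 1).toNat % 5 = 2
      · rw [if_pos (hmod1.mpr h1), if_pos h1]
      · rw [if_neg (fun hc => h1 (hmod1.mp hc)), if_neg h1]

theorem prefix_step (x : Int) (hx : -1 ≤ x) :
    pvPrefix (x + 1) = pvPrefix x + (if pvGood (x + 1) then 1 else 0) := by
  by_cases hx0 : 0 ≤ x
  · have h1 : pvCnt (x + 1 - 1) = ((CN (x.toNat + 1) : Nat) : Int) := by
      rw [show x + 1 - 1 = x by ring, pvCnt_eq x hx0]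
    have h2 : pvCnt (x - 1) = ((CN x.toNat : Nat) : Int) := by
      by_cases hx1 : 1 ≤ x
      · rw [pvCnt_eq (x - 1) (by omega)]
        congr 2
        omega
      · have h00 : x = 0 := by omega
        subst h00
        rw [show (0:Int) - 1 = -1 from by norm_num, pvCnt, if_pos (by norm_num)]
        norm_num [CN]
    have hgc : pvGood (x + 1) = noTwoN x.toNat := by
      rw [good_char _ (by omega)]
      congr 1
      omega
    have hCN : CN (x.toNat + 1) = CN x.toNat + (if noTwoN x.toNat then 1 else 0) := rfl
    simp only [pvPrefix]
    rw [if_neg (by omega), if_neg (by omega), h1, h2, hgc, hCN]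
    by_cases hnt : noTwoN x.toNat <;> simp [hnt] <;> ring
  · have h00 : x = -1 := by omega
    subst h00
    have hc : pvCnt (-1) = 0 := by
      rw [pvCnt, if_pos (by norm_num)]
    have hg : pvGood 0 = true := by
      rw [pvGood, pvLoopA]
      norm_num [pvmod5, pvdiv5]
    norm_num [pvPrefix, hc, hg]

theorem main_sum (l r : Int) (hl : 0 ≤ l) (hr : l - 1 ≤ r) :
    (PySem.List.pyRange l (r + 1) 1).foldl
      (fun answer idx =>
        if PySem.Int.mod idx 5 = 3 then answer
        else if pvLoopA idx then answer + 1 else answer) 0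
      = pvPrefix r - pvPrefix (l - 1) := by
  have body_eq : ∀ (a i : Int),
      (if PySem.Int.mod i 5 = 3 then a else if pvLoopA i then a + 1 else a)
        = a + (if pvGood i then 1 else 0) := by
    intro a i
    simp only [pvGood, pvmod5]
    by_cases hcase : i % 5 = 3
    · simp [hcase]
    · by_cases hl2 : pvLoopA i <;> simp [hcase, hl2]
  have key : ∀ (nn : Nat) (r : Int), l - 1 ≤ r → (r + 1 - l).toNat = nn →
      (PySem.List.pyRange l (r + 1) 1).foldl
        (fun answer idx =>
          if PySem.Int.mod idx 5 = 3 then answer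
          else if pvLoopA idx then answer + 1 else answer) 0
        = pvPrefix r - pvPrefix (l - 1) := by
    intro nn
    induction nn with
    | zero =>
      intro r hr0 h0
      rw [show r + 1 = l by omega, PySem.List.pyRange_one_eq_nil (le_refl l),
        show r = l - 1 by omega]
      simp
    | succ nn ih =>
      intro r hr0 h0
      have hlr : l ≤ r := by omega
      have e : r - 1 + 1 = r := by ring
      have ihr := ih (r - 1) (by omega) (by omega)
      rw [e] at ihr
      rw [PySem.List.pyRange_one_succ_right (by omega : l ≤ r), List.foldl_append, ihr]
      simp only [List.foldl_cons, List.foldl_nil]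
      rw [body_eq]
      have ps := prefix_step (r - 1) (by omega)
      rw [e] at ps
      rw [ps]
      ring
  exact key (r + 1 - l).toNat r hr rfl

-- ===== VERDICT (by name: the statement is the Claim_ definition above) =====
theorem solution_spec : Claim_equal_solution := by
  intro n l r _ hpre
  unfold Spec_solution solution solution_alt
  by_cases hrl : r < l
  · rw [PySem.List.pyRange_one_eq_nil (by omega)]
    simp [hrl]
  · have hl : 0 ≤ l := by
      cases hpre with
      | inl h => exact h
      | inr h => exact absurd h hrl
    rw [main_sum l r hl (by omega)]
    simp [hrl]
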